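-- pv_equiv track=rewrite | github.com/mantavya0807/DeClutter | OD.py | select_largest_instances
-- ===== SOURCE A (Python) =====
-- def calculate_bbox_area(coords):
--     """Calculate the area of a bounding box."""
--     x_min, y_min, x_max, y_max = coords
--     return (x_max - x_min) * (y_max - y_min)
--
-- def select_largest_instances(all_detections):
--     """
--     For each object class, select only the instance with the largest bounding box area.
--     Returns a filtered dictionary with only the largest instances.
--     """
--     class_largest = {}  # class_name -> (coords, area)
--
--     for coords, class_name in all_detections.items():
--         area = calculate_bbox_area(coords)
--
--         if class_name not in class_largest:
--             class_largest[class_name] = (coords, area)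
--         else:
--             current_coords, current_area = class_largest[class_name]
--             if area > current_area:
--                 class_largest[class_name] = (coords, area)
--
--     # Convert back to the original format
--     filtered_detections = {}
--     for class_name, (coords, area) in class_largest.items():
--         filtered_detections[coords] = class_name
--
--     return filtered_detections
-- ===== SOURCE B (Python) =====
-- def calculate_bbox_area(coords):
--     """Calculate the area of a bounding box."""
--     x_min, y_min, x_max, y_max = coords
--     return (x_max - x_min) * (y_max - y_min)
--
-- def select_largest_instances(all_detections):
--     # Group coords by class (insertion order), then pick the largest per class.
--     groups = {}
--     for coords, class_name in all_detections.items():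
--         groups.setdefault(class_name, []).append(coords)
--     filtered_detections = {}
--     for class_name, coords_list in groups.items():
--         best = max(coords_list, key=calculate_bbox_area)
--         filtered_detections[best] = class_name
--     return filtered_detections
-- ===== Notes on version B (the rewrite author's own statement) =====
-- stated objective: alternative
-- what changed: Replaces A's single-pass running-max tracking (dict of class -> (coords, area) updated conditionally) by a group-then-reduce decomposition: first group coords by class with setdefault, then pick max(coords_list, key=calculate_bbox_area) per class; first-maximal tie-breaking and insertion order are preserved.
import Mathlib
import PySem

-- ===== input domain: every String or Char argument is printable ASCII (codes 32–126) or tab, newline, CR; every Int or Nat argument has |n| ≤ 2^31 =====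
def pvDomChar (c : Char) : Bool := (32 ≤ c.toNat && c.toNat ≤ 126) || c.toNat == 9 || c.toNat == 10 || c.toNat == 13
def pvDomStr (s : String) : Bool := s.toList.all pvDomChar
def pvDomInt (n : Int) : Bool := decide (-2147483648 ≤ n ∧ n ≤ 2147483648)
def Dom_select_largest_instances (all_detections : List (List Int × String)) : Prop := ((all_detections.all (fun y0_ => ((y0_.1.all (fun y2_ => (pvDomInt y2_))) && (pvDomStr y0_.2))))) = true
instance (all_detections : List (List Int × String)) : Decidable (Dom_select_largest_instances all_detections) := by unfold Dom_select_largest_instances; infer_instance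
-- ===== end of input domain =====

-- B replaces the running-max tracking by a group-then-reduce decomposition (group coords by class, then max by area per class); objective: alternative decomposition, same cost.

-- ===== PORT A =====
-- calculate_bbox_area: the 4-way unpack raises ValueError unless coords has exactly 4 elements;
-- that case is excluded by Pre_, the `| _ => 0` arm is only a totality guard.
def pvArea4 (coords : List Int) : Int :=
  match coords with
  | [x_min, y_min, x_max, y_max] => (x_max - x_min) * (y_max - y_min)
  | _ => 0

-- loop body of A's first pass (kept as a named helper; it is the literal loop body)
def pvStepA (d : PySem.Dict String (List Int × Int)) (p : List Int × String) :
    PySem.Dict String (List Int × Int) :=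
  let area := pvArea4 p.1
  match d.get? p.2 with
  | none => d.insert p.2 (p.1, area)
  | some cur => if area > cur.2 then d.insert p.2 (p.1, area) else d

def select_largest_instances (all_detections : List (List Int × String)) : List (List Int × String) :=
  let class_largest := all_detections.foldl pvStepA PySem.Dict.empty
  (class_largest.items.foldl
    (fun f kv => f.insert kv.2.1 kv.1)
    (PySem.Dict.empty : PySem.Dict (List Int) String)).items

-- ===== PORT B =====
-- loop body of B's first pass: groups.setdefault(class_name, []).append(coords)
def pvStepG (d : PySem.Dict String (List (List Int))) (p : List Int × String) :
    PySem.Dict String (List (List Int)) :=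
  d.modify p.2 [] (· ++ [p.1])

def select_largest_instances_alt (all_detections : List (List Int × String)) : List (List Int × String) :=
  let groups := all_detections.foldl pvStepG PySem.Dict.empty
  (groups.items.foldl
    (fun f kv =>
      match PySem.List.max? kv.2 pvArea4 with
      | some best => f.insert best kv.1
      | none => f)
    (PySem.Dict.empty : PySem.Dict (List Int) String)).items

-- ===== PRECONDITION & SPEC =====
-- Pre_ excludes inputs where Python raises: a coords tuple whose length is not 4 makes
-- calculate_bbox_area's unpack raise ValueError; and the argument is a Python dict keyed by
-- coords, so the association list must have pairwise-distinct coords keys.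
def Pre_select_largest_instances (all_detections : List (List Int × String)) : Prop :=
  (∀ p ∈ all_detections, p.1.length = 4) ∧ (all_detections.map (·.1)).Nodup
instance (all_detections : List (List Int × String)) : Decidable (Pre_select_largest_instances all_detections) := by unfold Pre_select_largest_instances; infer_instance

def pvWitness_select_largest_instances : (List (List Int × String)) :=
  [([0, 0, 1, 1], "cat"), ([0, 0, 2, 2], "cat"), ([1, 1, 2, 3], "dog")]

def Spec_select_largest_instances (all_detections : List (List Int × String)) (out : List (List Int × String)) : Prop := out = select_largest_instances_alt all_detections
instance (all_detections : List (List Int × String)) (out : List (List Int × String)) : Decidable (Spec_select_largest_instances all_detections out) := by unfold Spec_select_largest_instances; infer_instance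

-- ===== CLAIM (what is proved, stated in full; the proofs are below) =====
def Claim_equal_select_largest_instances : Prop := ∀ (all_detections : List (List Int × String)), Dom_select_largest_instances all_detections → Pre_select_largest_instances all_detections → Spec_select_largest_instances all_detections (select_largest_instances all_detections)

-- ===== LEMMAS AND PROOFS =====

-- the coords of the detections of class c, in input order
def pvFilt (c : String) (l : List (List Int × String)) : List (List Int) :=
  (l.filter (fun p => p.2 == c)).map (·.1)

-- A's running best (coords, area) over a class's coords list
def pvBest (x : List Int) (t : List (List Int)) : List Int × Int :=
  t.foldl (fun b y => if pvArea4 y > b.2 then (y, pvArea4 y) else b) (x, pvArea4 x)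

-- the first area-maximal element (what Python's max(…, key=…) returns)
def pvMax (x : List Int) (t : List (List Int)) : List Int :=
  t.foldl (fun m y => if pvArea4 m < pvArea4 y then y else m) x

theorem pvBest_eq_pvMax (t : List (List Int)) (x : List Int) :
    pvBest x t = (pvMax x t, pvArea4 (pvMax x t)) := by
  induction t generalizing x with
  | nil => rfl
  | cons y t ih =>
    simp only [pvBest, pvMax, List.foldl_cons] at *
    by_cases h : pvArea4 x < pvArea4 y
    · simpa [h, gt_iff_lt] using ih y
    · simpa [h, gt_iff_lt] using ih x

theorem pvMax?_cons (x : List Int) (t : List (List Int)) :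
    PySem.List.max? (x :: t) pvArea4 = some (pvMax x t) := by
  induction t generalizing x with
  | nil => rfl
  | cons y t ih =>
    have h1 : PySem.List.max? (x :: y :: t) pvArea4
        = PySem.List.max? ((if pvArea4 x < pvArea4 y then y else x) :: t) pvArea4 := by
      simp only [PySem.List.max?, List.foldl_cons, apply_ite (f := some)]
    rw [h1, ih]
    simp only [pvMax, List.foldl_cons]

-- characterisation of A's first loop: keys are the classes in first-occurrence order,
-- and each class maps to the running best of its coords
theorem pvA_char (l : List (List Int × String)) :
    ((l.foldl pvStepA PySem.Dict.empty).keys = PySem.Set.ofList (l.map (·.2))) ∧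
    ∀ c, (l.foldl pvStepA PySem.Dict.empty).get? c =
      (match pvFilt c l with
       | [] => none
       | x :: t => some (pvBest x t)) := by
  induction l using List.reverseRecOn with
  | nil => exact ⟨rfl, fun c => rfl⟩
  | append_singleton l p ih =>
    obtain ⟨ihk, ihg⟩ := ih
    rw [List.foldl_append]
    set d := l.foldl pvStepA PySem.Dict.empty with hd
    simp only [List.foldl_cons, List.foldl_nil]
    have hfilt : ∀ c, pvFilt c (l ++ [p]) = pvFilt c l ++ (if p.2 = c then [p.1] else []) := by
      intro c; by_cases h : p.2 = c <;> simp [pvFilt, List.filter_append, h]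
    rcases h : pvFilt p.2 l with _ | ⟨x, t⟩
    · -- class p.2 not seen yet
      have hget : d.get? p.2 = none := by rw [ihg, h]
      have hstep : pvStepA d p = d.insert p.2 (p.1, pvArea4 p.1) := by
        simp [pvStepA, hget]
      have hnc : d.contains p.2 = false := by
        rw [PySem.Dict.contains_eq_isSome_get?, hget]; rfl
      have hnm : p.2 ∉ PySem.Set.ofList (l.map (·.2)) := by
        rw [PySem.Set.mem_ofList]
        intro hm
        obtain ⟨q, hq, hq2⟩ := List.mem_map.mp hm
        have hfil : l.filter (fun p' => p'.2 == p.2) = [] := List.map_eq_nil_iff.mp h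
        have hq' : q ∈ l.filter (fun p' => p'.2 == p.2) :=
          List.mem_filter.mpr ⟨hq, by simp [hq2]⟩
        rw [hfil] at hq'
        exact absurd hq' (by simp)
      constructor
      · rw [hstep, PySem.Dict.keys_insert_of_not_contains _ _ hnc, ihk]
        simp [PySem.Set.ofList_append_singleton, PySem.Set.add_of_not_mem hnm]
      · intro c
        rw [hstep, hfilt c]
        by_cases hc : c = p.2
        · subst hc
          rw [PySem.Dict.get?_insert_self, h]
          simp [pvBest]
        · rw [PySem.Dict.get?_insert_of_ne _ _ hc, ihg]
          simp [Ne.symm hc]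
    · -- class p.2 already present with best (pvBest x t)
      have hget : d.get? p.2 = some (pvBest x t) := by rw [ihg, h]
      have hc : d.contains p.2 = true := by
        rw [PySem.Dict.contains_eq_isSome_get?, hget]; rfl
      have hm : p.2 ∈ PySem.Set.ofList (l.map (·.2)) := by
        rw [PySem.Set.mem_ofList]
        have hne : l.filter (fun p' => p'.2 == p.2) ≠ [] := by
          intro hnil; simp [pvFilt, hnil] at h
        obtain ⟨q, hq⟩ := List.exists_mem_of_ne_nil _ hne
        have hq' := List.mem_filter.mp hq
        exact List.mem_map.mpr ⟨q, hq'.1, by simpa using hq'.2⟩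
      have hstep : pvStepA d p =
          (if pvArea4 p.1 > (pvBest x t).2 then d.insert p.2 (p.1, pvArea4 p.1) else d) := by
        simp [pvStepA, hget]
      constructor
      · rw [hstep]
        have hk2 : (if pvArea4 p.1 > (pvBest x t).2 then d.insert p.2 (p.1, pvArea4 p.1) else d).keys = d.keys := by
          by_cases hgt : pvArea4 p.1 > (pvBest x t).2
          · rw [if_pos hgt]; exact PySem.Dict.keys_insert_of_contains _ _ hc
          · rw [if_neg hgt]
        rw [hk2, ihk]
        simp [PySem.Set.ofList_append_singleton, PySem.Set.add_of_mem hm]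
      · intro c
        rw [hstep, hfilt c]
        by_cases hcp : c = p.2
        · subst hcp
          rw [h, if_pos rfl]
          have hb : pvBest x (t ++ [p.1]) =
              (if pvArea4 p.1 > (pvBest x t).2 then (p.1, pvArea4 p.1) else pvBest x t) := by
            simp [pvBest, List.foldl_append]
          by_cases hgt : pvArea4 p.1 > (pvBest x t).2
          · rw [if_pos hgt, PySem.Dict.get?_insert_self]
            simp [hb, hgt]
          · rw [if_neg hgt, hget]
            simp [hb, hgt]
        · have hne : ¬ (p.2 = c) := fun hh => hcp hh.symm
          rw [if_neg hne, List.append_nil]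
          by_cases hgt : pvArea4 p.1 > (pvBest x t).2
          · rw [if_pos hgt, PySem.Dict.get?_insert_of_ne _ _ hcp, ihg]
          · rw [if_neg hgt, ihg]

theorem pvG_char (l : List (List Int × String)) :
    ((l.foldl pvStepG PySem.Dict.empty).keys = PySem.Set.ofList (l.map (·.2))) ∧
    ∀ c, (l.foldl pvStepG PySem.Dict.empty).get? c =
      (match pvFilt c l with
       | [] => none
       | x :: t => some (x :: t)) := by
  induction l using List.reverseRecOn with
  | nil => exact ⟨rfl, fun c => rfl⟩
  | append_singleton l p ih =>
    obtain ⟨ihk, ihg⟩ := ih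
    rw [List.foldl_append]
    set d := l.foldl pvStepG PySem.Dict.empty with hd
    simp only [List.foldl_cons, List.foldl_nil]
    have hfilt : ∀ c, pvFilt c (l ++ [p]) = pvFilt c l ++ (if p.2 = c then [p.1] else []) := by
      intro c; by_cases h : p.2 = c <;> simp [pvFilt, List.filter_append, h]
    have hstep : pvStepG d p = d.insert p.2 (d.getD p.2 [] ++ [p.1]) := rfl
    rcases h : pvFilt p.2 l with _ | ⟨x, t⟩
    · have hget : d.get? p.2 = none := by rw [ihg, h]
      have hnc : d.contains p.2 = false := by
        rw [PySem.Dict.contains_eq_isSome_get?, hget]; rfl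
      have hnm : p.2 ∉ PySem.Set.ofList (l.map (·.2)) := by
        rw [PySem.Set.mem_ofList]
        intro hm
        obtain ⟨q, hq, hq2⟩ := List.mem_map.mp hm
        have hfil : l.filter (fun p' => p'.2 == p.2) = [] := List.map_eq_nil_iff.mp h
        have hq' : q ∈ l.filter (fun p' => p'.2 == p.2) :=
          List.mem_filter.mpr ⟨hq, by simp [hq2]⟩
        rw [hfil] at hq'
        exact absurd hq' (by simp)
      have hgd : d.getD p.2 [] = [] := by
        rw [PySem.Dict.getD_eq_get?_getD, hget]; rfl
      constructor
      · rw [hstep, PySem.Dict.keys_insert_of_not_contains _ _ hnc, ihk]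
        simp [PySem.Set.ofList_append_singleton, PySem.Set.add_of_not_mem hnm]
      · intro c
        rw [hstep, hfilt c]
        by_cases hc : c = p.2
        · subst hc
          rw [PySem.Dict.get?_insert_self, h, hgd]
          simp
        · rw [PySem.Dict.get?_insert_of_ne _ _ hc, ihg]
          simp [Ne.symm hc]
    · have hget : d.get? p.2 = some (x :: t) := by rw [ihg, h]
      have hc : d.contains p.2 = true := by
        rw [PySem.Dict.contains_eq_isSome_get?, hget]; rfl
      have hm : p.2 ∈ PySem.Set.ofList (l.map (·.2)) := by
        rw [PySem.Set.mem_ofList]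
        have hne : l.filter (fun p' => p'.2 == p.2) ≠ [] := by
          intro hnil; simp [pvFilt, hnil] at h
        obtain ⟨q, hq⟩ := List.exists_mem_of_ne_nil _ hne
        have hq' := List.mem_filter.mp hq
        exact List.mem_map.mpr ⟨q, hq'.1, by simpa using hq'.2⟩
      have hgd : d.getD p.2 [] = x :: t := by
        rw [PySem.Dict.getD_eq_get?_getD, hget]; rfl
      constructor
      · rw [hstep, PySem.Dict.keys_insert_of_contains _ _ hc, ihk]
        simp [PySem.Set.ofList_append_singleton, PySem.Set.add_of_mem hm]
      · intro c
        rw [hstep, hfilt c]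
        by_cases hcp : c = p.2
        · subst hcp
          rw [PySem.Dict.get?_insert_self, h, hgd]
          simp
        · have hne : ¬ (p.2 = c) := fun hh => hcp hh.symm
          rw [if_neg hne, List.append_nil, PySem.Dict.get?_insert_of_ne _ _ hcp, ihg]

-- ===== VERDICT (by name: the statement is the Claim_ definition above) =====
theorem select_largest_instances_spec : Claim_equal_select_largest_instances := by
  intro all _hdom _hpre
  show select_largest_instances all = select_largest_instances_alt all
  simp only [select_largest_instances, select_largest_instances_alt]
  obtain ⟨hKA, hGA⟩ := pvA_char all
  obtain ⟨hKG, hGG⟩ := pvG_char all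
  set dA := all.foldl pvStepA PySem.Dict.empty with hdA
  set dG := all.foldl pvStepG PySem.Dict.empty with hdG
  have hndA : dA.keys.Nodup := by rw [hKA]; exact PySem.Set.nodup_ofList _
  have hndG : dG.keys.Nodup := by rw [hKG]; exact PySem.Set.nodup_ofList _
  rw [PySem.Dict.items_eq_map_keys dA hndA ([], 0), PySem.Dict.items_eq_map_keys dG hndG [],
    hKA, hKG, List.foldl_map, List.foldl_map]
  refine congrArg PySem.Dict.items (PySem.List.foldl_congr_mem _ _ _ _ ?_)
  intro acc c hcmem
  have hcm : c ∈ all.map (·.2) := (PySem.Set.mem_ofList _ _).mp hcmem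
  obtain ⟨q, hq, hq2⟩ := List.mem_map.mp hcm
  have hne : pvFilt c all ≠ [] := by
    intro hnil
    have hfil : all.filter (fun p' => p'.2 == c) = [] := List.map_eq_nil_iff.mp hnil
    have hq' : q ∈ all.filter (fun p' => p'.2 == c) :=
      List.mem_filter.mpr ⟨hq, by simp [hq2]⟩
    rw [hfil] at hq'
    exact absurd hq' (by simp)
  rcases hx : pvFilt c all with _ | ⟨x, t⟩
  · exact absurd hx hne
  · have hA : dA.getD c ([], 0) = pvBest x t := by
      rw [PySem.Dict.getD_eq_get?_getD, hGA c, hx]; rfl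
    have hG : dG.getD c [] = x :: t := by
      rw [PySem.Dict.getD_eq_get?_getD, hGG c, hx]; rfl
    rw [hA, hG, pvMax?_cons, pvBest_eq_pvMax]
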